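-- pv_equiv track=rewrite | github.com/reedwi/advent-of-code-2023 | 13/13.py | reflect_check
-- ===== SOURCE A (Python) =====
-- def reflect_check(group):
--     row_len = len(group)
--     reflects = []
--     for i, row in enumerate(group):
--         if i == 0 or row != group[i-1]:
--             continue
--         reflect = True
--         j = 1
--
--         while i+j <= row_len - 1 and i-1-j >= 0 and reflect:
--             if group[i + j] == group[i - 1 - j]:
--                 j += 1
--                 continue
--             else:
--                 reflect = False
--         if reflect:
--             reflects.append([i, j])
--     return reflects
-- ===== SOURCE B (Python) =====
-- def reflect_check(group):
--     n = len(group)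
--     reflects = []
--     for i in range(1, n):
--         top = group[:i]
--         top.reverse()
--         if all(a == b for a, b in zip(top, group[i:])):
--             reflects.append([i, min(i, n - i)])
--     return reflects
-- ===== Notes on version B (the rewrite author's own statement) =====
-- stated objective: alternative
-- what changed: Replaced A's flag-driven index-walking while loop (which also derives the width j by counting) with a per-candidate-line comparison of the reversed prefix against the suffix via zip/all, with the mirror width computed in closed form as min(i, n-i).
import Mathlib
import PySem

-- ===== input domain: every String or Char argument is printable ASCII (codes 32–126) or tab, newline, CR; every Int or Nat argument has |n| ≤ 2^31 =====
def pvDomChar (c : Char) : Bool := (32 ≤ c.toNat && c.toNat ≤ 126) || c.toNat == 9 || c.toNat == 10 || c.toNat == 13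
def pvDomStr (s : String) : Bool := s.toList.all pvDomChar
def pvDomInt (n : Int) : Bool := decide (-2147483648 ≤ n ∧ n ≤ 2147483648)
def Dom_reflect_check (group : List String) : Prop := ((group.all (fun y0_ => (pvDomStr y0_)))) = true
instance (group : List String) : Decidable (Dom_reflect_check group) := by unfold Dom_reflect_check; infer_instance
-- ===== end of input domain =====

-- B replaces A's flag-driven index-walking while loop with a reversed-prefix/suffix
-- comparison per candidate line and a closed-form width min(i, n-i); same results, similar cost.

-- ===== PORT A =====
-- the inner 'while i+j <= row_len-1 and i-1-j >= 0 and reflect' loop of A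
def reflectWhile (group : List String) (row_len i j : Int) (reflect : Bool) :
    Int × Bool :=
  if i + j ≤ row_len - 1 ∧ i - 1 - j ≥ 0 ∧ reflect = true then
    if PySem.List.pyGet? group (i + j) = PySem.List.pyGet? group (i - 1 - j) then
      reflectWhile group row_len i (j + 1) reflect
    else (j, false)
  else (j, reflect)
  termination_by (row_len - i - j).toNat
  decreasing_by omega

def reflect_check (group : List String) : List (List Int) :=
  (PySem.List.enumerate group 0).foldl
    (fun reflects p =>
      if p.1 = 0 ∨ ¬ (some p.2 = PySem.List.pyGet? group (p.1 - 1)) then reflects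
      else
        let r := reflectWhile group (group.length : Int) p.1 1 true
        if r.2 then reflects ++ [[p.1, r.1]] else reflects)
    []

-- ===== PORT B =====
def reflect_check_alt (group : List String) : List (List Int) :=
  (PySem.List.pyRange 1 (group.length : Int) 1).foldl
    (fun reflects i =>
      if ((PySem.List.slice group none (some i)).reverse.zip
            (PySem.List.slice group (some i) none)).all (fun p => p.1 == p.2) then
        reflects ++ [[i, min i ((group.length : Int) - i)]]
      else reflects)
    []

-- ===== PRECONDITION & SPEC =====
def Spec_reflect_check (group : List String) (out : List (List Int)) : Prop := out = reflect_check_alt group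
instance (group : List String) (out : List (List Int)) : Decidable (Spec_reflect_check group out) := by unfold Spec_reflect_check; infer_instance

-- ===== CLAIM (what is proved, stated in full; the proofs are below) =====
def Claim_equal_reflect_check : Prop := ∀ (group : List String), Dom_reflect_check group → Spec_reflect_check group (reflect_check group)

-- ===== LEMMAS AND PROOFS =====

-- A's while loop from position j: if every remaining mirror pair matches it stops at the
-- boundary with j = min i (n-i) and the flag still true, otherwise the flag is false.
theorem reflectWhile_spec (group : List String) (i : Int) (h1 : 1 ≤ i)
    (h2 : i < (group.length : Int)) :
    ∀ (j : Int), 1 ≤ j → j ≤ min i ((group.length : Int) - i) →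
      reflectWhile group (group.length : Int) i j true =
        (if ∀ t : Int, j ≤ t → t < min i ((group.length : Int) - i) →
            PySem.List.pyGet? group (i + t) = PySem.List.pyGet? group (i - 1 - t)
         then ((min i ((group.length : Int) - i), true) : Int × Bool)
         else ((reflectWhile group (group.length : Int) i j true).1, false)) := by
  set n : Int := (group.length : Int) with hn
  set m : Int := min i (n - i) with hm
  have main : ∀ (d : Nat) (j : Int), 1 ≤ j → j ≤ m → (m - j).toNat = d →
      reflectWhile group n i j true =
        (if ∀ t : Int, j ≤ t → t < m →
            PySem.List.pyGet? group (i + t) = PySem.List.pyGet? group (i - 1 - t)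
         then ((m, true) : Int × Bool)
         else ((reflectWhile group n i j true).1, false)) := by
    intro d
    induction d with
    | zero =>
      intro j hj hjm hd
      have hjm' : j = m := by omega
      have hguard : ¬ (i + j ≤ n - 1 ∧ i - 1 - j ≥ 0 ∧ (true : Bool) = true) := by
        rintro ⟨ha, hb, -⟩; omega
      have hstop : reflectWhile group n i j true = (j, true) := by
        rw [reflectWhile, if_neg hguard]
      have hvac : ∀ t : Int, j ≤ t → t < m →
          PySem.List.pyGet? group (i + t) = PySem.List.pyGet? group (i - 1 - t) := by
        intro t ht htm; omega
      rw [hstop, if_pos hvac, hjm']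
    | succ d ih =>
      intro j hj hjm hd
      have hjlt : j < m := by omega
      have hunf : reflectWhile group n i j true =
          (if PySem.List.pyGet? group (i + j) = PySem.List.pyGet? group (i - 1 - j) then
            reflectWhile group n i (j + 1) true
          else (j, false)) := by
        rw [reflectWhile, if_pos (show i + j ≤ n - 1 ∧ i - 1 - j ≥ 0 ∧ (true : Bool) = true by
          exact ⟨by omega, by omega, rfl⟩)]
      by_cases heq : PySem.List.pyGet? group (i + j) = PySem.List.pyGet? group (i - 1 - j)
      · have hstep : reflectWhile group n i j true = reflectWhile group n i (j + 1) true := by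
          rw [hunf, if_pos heq]
        rw [hstep, ih (j + 1) (by omega) (by omega) (by omega)]
        by_cases hall : ∀ t : Int, j + 1 ≤ t → t < m →
            PySem.List.pyGet? group (i + t) = PySem.List.pyGet? group (i - 1 - t)
        · rw [if_pos hall, if_pos]
          intro t ht htm
          rcases eq_or_lt_of_le ht with rfl | hlt
          · exact heq
          · exact hall t (by omega) htm
        · have hallj : ¬ ∀ t : Int, j ≤ t → t < m →
              PySem.List.pyGet? group (i + t) = PySem.List.pyGet? group (i - 1 - t) :=
            fun h => hall fun t ht htm => h t (by omega) htm
          rw [if_neg hall, if_neg hallj]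
      · have hstop : reflectWhile group n i j true = (j, false) := by
          rw [hunf, if_neg heq]
        have hall' : ¬ ∀ t : Int, j ≤ t → t < m →
            PySem.List.pyGet? group (i + t) = PySem.List.pyGet? group (i - 1 - t) := by
          intro h; exact heq (h j le_rfl (by omega))
        rw [hstop, if_neg hall']
  intro j hj hjm
  exact main (m - j).toNat j hj hjm rfl

-- B's zip/all test on reversed prefix vs suffix holds iff every mirror pair matches.
theorem bodyB_iff (group : List String) (i : Int) (h1 : 1 ≤ i)
    (h2 : i < (group.length : Int)) :
    ((((PySem.List.slice group none (some i)).reverse.zip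
        (PySem.List.slice group (some i) none)).all (fun p => p.1 == p.2)) = true)
      ↔ (∀ t : Int, 0 ≤ t → t < min i ((group.length : Int) - i) →
          PySem.List.pyGet? group (i + t) = PySem.List.pyGet? group (i - 1 - t)) := by
  have h0i : (0 : Int) ≤ i := by omega
  have hilen : i.toNat ≤ group.length := by omega
  rw [PySem.List.slice_to group h0i, PySem.List.slice_from group h0i, List.all_eq_true]
  constructor
  · intro hall t ht htm
    have hkl : t.toNat <
        (((group.take i.toNat).reverse).zip (group.drop i.toNat)).length := by
      rw [List.length_zip, List.length_reverse, List.length_take, List.length_drop]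
      omega
    have hx := hall _ (List.getElem_mem hkl)
    simp only [List.getElem_zip, List.getElem_reverse, List.getElem_take,
      List.getElem_drop, List.length_take, beq_iff_eq] at hx
    rw [PySem.List.pyGet?_eq_some_getElem group (by omega) (by omega),
      PySem.List.pyGet?_eq_some_getElem group (by omega) (by omega)]
    congr 1
    calc group[(i + t).toNat]'(by omega)
        = group[i.toNat + t.toNat]'(by omega) := by
          simp only [show (i + t).toNat = i.toNat + t.toNat from by omega]
      _ = group[min i.toNat group.length - 1 - t.toNat]'(by omega) := hx.symm
      _ = group[(i - 1 - t).toNat]'(by omega) := by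
          simp only [show min i.toNat group.length - 1 - t.toNat = (i - 1 - t).toNat from by omega]
  · intro hmt x hx
    obtain ⟨k, hkl, rfl⟩ := List.mem_iff_getElem.1 hx
    have hkm : k < min i.toNat (group.length - i.toNat) := by
      rw [List.length_zip, List.length_reverse, List.length_take, List.length_drop] at hkl
      omega
    have := hmt (k : Int) (by omega) (by omega)
    rw [PySem.List.pyGet?_eq_some_getElem group (by omega) (by omega),
      PySem.List.pyGet?_eq_some_getElem group (by omega) (by omega),
      Option.some_inj] at this
    simp only [List.getElem_zip, List.getElem_reverse, List.getElem_take,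
      List.getElem_drop, List.length_take, beq_iff_eq]
    calc group[min i.toNat group.length - 1 - k]'(by omega)
        = group[(i - 1 - (k : Int)).toNat]'(by omega) := by
          simp only [show min i.toNat group.length - 1 - k = (i - 1 - (k : Int)).toNat from by omega]
      _ = group[(i + (k : Int)).toNat]'(by omega) := this.symm
      _ = group[i.toNat + k]'(by omega) := by
          simp only [show (i + (k : Int)).toNat = i.toNat + k from by omega]

-- ===== VERDICT (by name: the statement is the Claim_ definition above) =====
theorem reflect_check_spec : Claim_equal_reflect_check := by
  intro group _
  unfold Spec_reflect_check reflect_check reflect_check_alt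
  rcases Nat.eq_zero_or_pos group.length with hlen | hlen
  · obtain rfl : group = [] := List.length_eq_zero_iff.mp hlen
    rfl
  · have h0 : (0 : Int) < (group.length : Int) := by exact_mod_cast hlen
    rw [PySem.List.enumerate_eq_map_pyRange group "", List.foldl_map,
      show PySem.List.pyRange 0 (PySem.List.len group) = 0 :: PySem.List.pyRange 1 (group.length : Int) from by
        rw [PySem.List.pyRange_one_cons (by simpa [PySem.List.len] using h0)]
        norm_num [PySem.List.len],
      List.foldl_cons]
    simp only [true_or, if_true]
    apply PySem.List.foldl_congr_mem
    intro acc x hx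
    rw [PySem.List.mem_pyRange_one] at hx
    obtain ⟨hx1, hx2⟩ := hx
    have hrow : some (PySem.List.pyGetD group x "") = PySem.List.pyGet? group x := by
      rw [PySem.List.pyGet?_eq_some_getElem group (by omega) hx2,
        PySem.List.pyGetD_eq_getElem group "" (by omega) hx2]
    by_cases hc : ∀ t : Int, 0 ≤ t → t < min x ((group.length : Int) - x) →
        PySem.List.pyGet? group (x + t) = PySem.List.pyGet? group (x - 1 - t)
    · have hm0 : PySem.List.pyGet? group x = PySem.List.pyGet? group (x - 1) := by
        have := hc 0 le_rfl (by omega)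
        simpa using this
      rw [if_neg (show ¬ (x = 0 ∨ ¬ (some (PySem.List.pyGetD group x "") = PySem.List.pyGet? group (x - 1))) by
        push_neg
        exact ⟨by omega, hrow.trans hm0⟩)]
      rw [reflectWhile_spec group x hx1 hx2 1 le_rfl (by omega),
        if_pos (fun t ht htm => hc t (by omega) htm)]
      rw [if_pos ((bodyB_iff group x hx1 hx2).mpr hc)]
      simp
    · rw [if_neg (show ¬ ((((PySem.List.slice group none (some x)).reverse.zip
          (PySem.List.slice group (some x) none)).all (fun p => p.1 == p.2)) = true) from
          fun h => hc ((bodyB_iff group x hx1 hx2).mp h))]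
      by_cases hm0 : PySem.List.pyGet? group x = PySem.List.pyGet? group (x - 1)
      · rw [if_neg (show ¬ (x = 0 ∨ ¬ (some (PySem.List.pyGetD group x "") = PySem.List.pyGet? group (x - 1))) by
          push_neg
          exact ⟨by omega, hrow.trans hm0⟩)]
        have hall : ¬ ∀ t : Int, 1 ≤ t → t < min x ((group.length : Int) - x) →
            PySem.List.pyGet? group (x + t) = PySem.List.pyGet? group (x - 1 - t) := by
          intro h
          apply hc
          intro t ht htm
          rcases eq_or_lt_of_le ht with rfl | hlt
          · simpa using hm0
          · exact h t (by omega) htm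
        rw [reflectWhile_spec group x hx1 hx2 1 le_rfl (by omega), if_neg hall]
        simp
      · rw [if_pos (Or.inr (fun h => hm0 (hrow.symm.trans h)))]
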